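-- pv_equiv track=rewrite | github.com/hograines/Calculator | Main.py | check_fact_tilda_sum
-- ===== SOURCE A (Python) =====
-- def check_fact_tilda_sum(unchecked):
--     '''
--     :param unchecked: A math expression
--     :return: Whether the operators Tilda, Sum and Factorial were places correctly in the expression
--     '''
--     for i in range(len(unchecked)):
--         if unchecked[i] == '~':
--             if i > 0 and unchecked[i - 1].isdigit():
--                 return False
--         elif unchecked[i] == '!':
--             if i < len(unchecked) - 1 and unchecked[i + 1].isdigit():
--                 return False
--         elif unchecked[i] == '#':
--             if i < len(unchecked) - 1 and unchecked[i + 1].isdigit():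
--                 return False
--     return True
-- ===== SOURCE B (Python) =====
-- def check_fact_tilda_sum(unchecked):
--     # Abstract the expression into character classes ('d' digit, '!' for '!'/'#',
--     # '~', '.' other), then reject iff a forbidden class bigram occurs as a substring.
--     def cls(c):
--         if c.isdigit():
--             return 'd'
--         if c == '!' or c == '#':
--             return '!'
--         if c == '~':
--             return '~'
--         return '.'
--     t = ''.join(map(cls, unchecked))
--     return 'd~' not in t and '!d' not in t
-- ===== Notes on version B (the rewrite author's own statement) =====
-- stated objective: alternative
-- what changed: Instead of scanning positions with prev/next index checks, B first maps the string to a character-class abstraction ('d' digit, '!' for '!'/'#', '~', '.' other) and then decides validity by substring search: the expression is invalid iff the class string contains the bigram 'd~' or '!d'.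
import Mathlib
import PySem

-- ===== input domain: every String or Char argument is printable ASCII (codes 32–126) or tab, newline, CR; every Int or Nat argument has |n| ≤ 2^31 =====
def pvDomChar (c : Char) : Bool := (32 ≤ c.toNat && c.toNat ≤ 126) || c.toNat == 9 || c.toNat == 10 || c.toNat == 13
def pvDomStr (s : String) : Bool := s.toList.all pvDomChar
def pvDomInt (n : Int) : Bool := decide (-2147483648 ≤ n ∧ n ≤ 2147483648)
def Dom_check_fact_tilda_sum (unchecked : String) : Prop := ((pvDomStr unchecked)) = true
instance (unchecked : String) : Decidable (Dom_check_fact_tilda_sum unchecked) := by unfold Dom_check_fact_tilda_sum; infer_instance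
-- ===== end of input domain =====

-- B replaces A's index loop with prev/next checks by a character-class
-- abstraction of the string followed by two substring searches; same return
-- value, objective: alternative.

-- ===== PORT A =====
-- literal port of A's index loop: for i in range(len(unchecked)) with early `return False`
def pvAGo (cs : List Char) (i : Nat) : Bool :=
  if h : i < cs.length then
    if cs[i] = '~' then
      if h0 : 0 < i then
        if PySem.Chars.isdigit (cs[i - 1]'(by omega)) then false else pvAGo cs (i + 1)
      else pvAGo cs (i + 1)
    else if cs[i] = '!' then
      if h1 : i < cs.length - 1 then
        if PySem.Chars.isdigit (cs[i + 1]'(by omega)) then false else pvAGo cs (i + 1)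
      else pvAGo cs (i + 1)
    else if cs[i] = '#' then
      if h1 : i < cs.length - 1 then
        if PySem.Chars.isdigit (cs[i + 1]'(by omega)) then false else pvAGo cs (i + 1)
      else pvAGo cs (i + 1)
    else pvAGo cs (i + 1)
  else true
termination_by cs.length - i

def check_fact_tilda_sum (unchecked : String) : Bool :=
  pvAGo unchecked.toList 0

-- ===== PORT B =====
-- B's `cls`: character class of c ('d' digit, '!' for '!'/'#', '~', '.' other)
def pvCls (c : Char) : Char :=
  if PySem.Chars.isdigit c then 'd'
  else if c = '!' || c = '#' then '!'
  else if c = '~' then '~'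
  else '.'

-- B: classify every character, then substring search for the forbidden bigrams
def check_fact_tilda_sum_alt (unchecked : String) : Bool :=
  let t := unchecked.toList.map pvCls
  !(PySem.Chars.isIn ['d', '~'] t) && !(PySem.Chars.isIn ['!', 'd'] t)

-- ===== PRECONDITION & SPEC =====
def Spec_check_fact_tilda_sum (unchecked : String) (out : Bool) : Prop := out = check_fact_tilda_sum_alt unchecked
instance (unchecked : String) (out : Bool) : Decidable (Spec_check_fact_tilda_sum unchecked out) := by unfold Spec_check_fact_tilda_sum; infer_instance

-- ===== CLAIM (what is proved, stated in full; the proofs are below) =====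
def Claim_equal_check_fact_tilda_sum : Prop := ∀ (unchecked : String), Dom_check_fact_tilda_sum unchecked → Spec_check_fact_tilda_sum unchecked (check_fact_tilda_sum unchecked)

-- ===== LEMMAS AND PROOFS =====

-- what A's loop, resumed at index i, still guarantees when it returns True:
-- no '~'-violation at any pair (j, j+1) with j+1 ≥ i, no '!'/'#'-violation at any pair with j ≥ i
def pvOkFrom (cs : List Char) (i : Nat) : Prop :=
  (∀ j, j + 1 < cs.length → i ≤ j + 1 →
      ¬(cs.getD (j+1) ' ' = '~' ∧ PySem.Chars.isdigit (cs.getD j ' ') = true)) ∧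
  (∀ j, j + 1 < cs.length → i ≤ j →
      ¬((cs.getD j ' ' = '!' ∨ cs.getD j ' ' = '#') ∧ PySem.Chars.isdigit (cs.getD (j+1) ' ') = true))

theorem pvOkFrom_succ (cs : List Char) (i : Nat) (h : i < cs.length) :
    pvOkFrom cs i ↔ pvOkFrom cs (i + 1) ∧
      (0 < i → ¬(cs.getD i ' ' = '~' ∧ PySem.Chars.isdigit (cs.getD (i-1) ' ') = true)) ∧
      (i + 1 < cs.length →
        ¬((cs.getD i ' ' = '!' ∨ cs.getD i ' ' = '#') ∧ PySem.Chars.isdigit (cs.getD (i+1) ' ') = true)) := by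
  constructor
  · rintro ⟨t, s⟩
    refine ⟨⟨fun j hj hij => t j hj (by omega), fun j hj hij => s j hj (by omega)⟩, ?_, ?_⟩
    · intro h0
      have := t (i - 1) (by omega) (by omega)
      simpa [show i - 1 + 1 = i from by omega] using this
    · intro h1
      exact s i h1 (le_refl i)
  · rintro ⟨⟨t, s⟩, e1, e2⟩
    constructor
    · intro j hj hij
      by_cases hc : i + 1 ≤ j + 1
      · exact t j hj hc
      · have hji : j + 1 = i := by omega
        have h0 : 0 < i := by omega
        have := e1 h0
        rw [show j = i - 1 from by omega]
        rw [show i - 1 + 1 = i from by omega]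
        exact this
    · intro j hj hij
      by_cases hc : i + 1 ≤ j
      · exact s j hj hc
      · have hji : j = i := by omega
        subst hji
        exact e2 hj

theorem pvAGo_eq_true_iff (cs : List Char) (i : Nat) :
    pvAGo cs i = true ↔ pvOkFrom cs i := by
  induction i using pvAGo.induct cs with
  | case1 i h e h0 d =>
    rw [pvAGo]
    simp only [dif_pos h, if_pos e, dif_pos h0, if_pos d]
    simp only [Bool.false_eq_true, false_iff]
    rintro ⟨t, _⟩
    have := t (i - 1) (by omega) (by omega)
    rw [show i - 1 + 1 = i from by omega] at this
    exact this ⟨by rw [List.getD_eq_getElem _ _ h]; exact e,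
                by rw [List.getD_eq_getElem _ _ (by omega)]; exact d⟩
  | case2 i h e h0 d ih =>
    rw [pvAGo]
    simp only [dif_pos h, if_pos e, dif_pos h0, if_neg d]
    rw [ih, pvOkFrom_succ cs i h]
    have eg : cs.getD i ' ' = '~' := by rw [List.getD_eq_getElem _ _ h]; exact e
    simp only [eg]
    constructor
    · intro hk
      refine ⟨hk, ?_, ?_⟩
      · rintro _ ⟨_, hd⟩
        exact d (by rw [List.getD_eq_getElem _ _ (by omega)] at hd; exact hd)
      · rintro _ ⟨hc, _⟩
        rcases hc with hc | hc <;> simp at hc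
    · rintro ⟨hk, _, _⟩; exact hk
  | case3 i h e h0 ih =>
    rw [pvAGo]
    simp only [dif_pos h, if_pos e, dif_neg h0]
    rw [ih, pvOkFrom_succ cs i h]
    have eg : cs.getD i ' ' = '~' := by rw [List.getD_eq_getElem _ _ h]; exact e
    simp only [eg]
    constructor
    · intro hk
      refine ⟨hk, fun hi => absurd hi h0, ?_⟩
      · rintro _ ⟨hc, _⟩
        rcases hc with hc | hc <;> simp at hc
    · rintro ⟨hk, _, _⟩; exact hk
  | case4 i h e1 e h1 d =>
    rw [pvAGo]
    simp only [dif_pos h, if_neg e1, if_pos e, dif_pos h1, if_pos d]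
    simp only [Bool.false_eq_true, false_iff]
    rintro ⟨_, s⟩
    exact s i (by omega) (le_refl i)
      ⟨Or.inl (by rw [List.getD_eq_getElem _ _ h]; exact e),
       by rw [List.getD_eq_getElem _ _ (by omega)]; exact d⟩
  | case5 i h e1 e h1 d ih =>
    rw [pvAGo]
    simp only [dif_pos h, if_neg e1, if_pos e, dif_pos h1, if_neg d]
    rw [ih, pvOkFrom_succ cs i h]
    have eg : cs.getD i ' ' = '!' := by rw [List.getD_eq_getElem _ _ h]; exact e
    have eg' : ¬ cs.getD i ' ' = '~' := by rw [eg]; simp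
    constructor
    · intro hk
      refine ⟨hk, fun _ hq => eg' hq.1, ?_⟩
      rintro _ ⟨_, hd⟩
      exact d (by rw [List.getD_eq_getElem _ _ (by omega)] at hd; exact hd)
    · rintro ⟨hk, _, _⟩; exact hk
  | case6 i h e1 e h1 ih =>
    rw [pvAGo]
    simp only [dif_pos h, if_neg e1, if_pos e, dif_neg h1]
    rw [ih, pvOkFrom_succ cs i h]
    have eg' : ¬ cs.getD i ' ' = '~' := by
      rw [List.getD_eq_getElem _ _ h]; exact e1
    constructor
    · intro hk
      refine ⟨hk, fun _ hq => eg' hq.1, fun hi => absurd (by omega : i < cs.length - 1) h1⟩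
    · rintro ⟨hk, _, _⟩; exact hk
  | case7 i h e1 e2 e h1 d =>
    rw [pvAGo]
    simp only [dif_pos h, if_neg e1, if_neg e2, if_pos e, dif_pos h1, if_pos d]
    simp only [Bool.false_eq_true, false_iff]
    rintro ⟨_, s⟩
    exact s i (by omega) (le_refl i)
      ⟨Or.inr (by rw [List.getD_eq_getElem _ _ h]; exact e),
       by rw [List.getD_eq_getElem _ _ (by omega)]; exact d⟩
  | case8 i h e1 e2 e h1 d ih =>
    rw [pvAGo]
    simp only [dif_pos h, if_neg e1, if_neg e2, if_pos e, dif_pos h1, if_neg d]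
    rw [ih, pvOkFrom_succ cs i h]
    have eg' : ¬ cs.getD i ' ' = '~' := by
      rw [List.getD_eq_getElem _ _ h]; exact e1
    constructor
    · intro hk
      refine ⟨hk, fun _ hq => eg' hq.1, ?_⟩
      rintro _ ⟨_, hd⟩
      exact d (by rw [List.getD_eq_getElem _ _ (by omega)] at hd; exact hd)
    · rintro ⟨hk, _, _⟩; exact hk
  | case9 i h e1 e2 e h1 ih =>
    rw [pvAGo]
    simp only [dif_pos h, if_neg e1, if_neg e2, if_pos e, dif_neg h1]
    rw [ih, pvOkFrom_succ cs i h]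
    have eg' : ¬ cs.getD i ' ' = '~' := by
      rw [List.getD_eq_getElem _ _ h]; exact e1
    constructor
    · intro hk
      refine ⟨hk, fun _ hq => eg' hq.1, fun hi => absurd (by omega : i < cs.length - 1) h1⟩
    · rintro ⟨hk, _, _⟩; exact hk
  | case10 i h e1 e2 e3 ih =>
    rw [pvAGo]
    simp only [dif_pos h, if_neg e1, if_neg e2, if_neg e3]
    rw [ih, pvOkFrom_succ cs i h]
    have g1 : ¬ cs.getD i ' ' = '~' := by rw [List.getD_eq_getElem _ _ h]; exact e1
    have g2 : ¬ cs.getD i ' ' = '!' := by rw [List.getD_eq_getElem _ _ h]; exact e2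
    have g3 : ¬ cs.getD i ' ' = '#' := by rw [List.getD_eq_getElem _ _ h]; exact e3
    constructor
    · intro hk
      refine ⟨hk, fun _ hq => g1 hq.1, ?_⟩
      rintro _ ⟨hc, _⟩
      rcases hc with hc | hc
      · exact g2 hc
      · exact g3 hc
    · rintro ⟨hk, _, _⟩; exact hk
  | case11 i h =>
    rw [pvAGo]
    simp only [dif_neg h, true_iff]
    exact ⟨fun j hj hij => absurd (by omega : i < cs.length) h,
           fun j hj hij => absurd (by omega : i < cs.length) h⟩

-- a two-character pattern is an infix exactly when it appears at adjacent indices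
theorem pair_infix_iff (a b : Char) (t : List Char) :
    PySem.Chars.isIn [a, b] t = true ↔
      ∃ j, j + 1 < t.length ∧ t.getD j ' ' = a ∧ t.getD (j+1) ' ' = b := by
  rw [PySem.Chars.isIn_iff_infix]
  constructor
  · rintro ⟨s, u, ht⟩
    refine ⟨s.length, ?_, ?_, ?_⟩
    · rw [← ht]; simp
    · rw [← ht, List.getD_eq_getElem _ _ (by simp)]
      rw [List.getElem_append_left (by simp)]
      rw [List.getElem_append_right (by omega)]
      simp
    · rw [← ht, List.getD_eq_getElem _ _ (by simp)]
      rw [List.getElem_append_left (by simp)]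
      rw [List.getElem_append_right (by omega)]
      simp
  · rintro ⟨j, hj, ha, hb⟩
    refine ⟨t.take j, t.drop (j + 2), ?_⟩
    rw [List.getD_eq_getElem _ _ (by omega)] at ha
    rw [List.getD_eq_getElem _ _ hj] at hb
    conv_rhs => rw [← List.take_append_drop j t]
    rw [List.drop_eq_getElem_cons (by omega : j < t.length)]
    rw [List.drop_eq_getElem_cons (h := hj)]
    simp [ha, hb, show j + 1 + 1 = j + 2 from rfl]

theorem pvCls_eq_d (c : Char) : pvCls c = 'd' ↔ PySem.Chars.isdigit c = true := by
  unfold pvCls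
  split_ifs with h1 h2 h3
  · exact ⟨fun _ => h1, fun _ => rfl⟩
  · exact ⟨fun h => absurd h (by decide), fun hd => absurd hd h1⟩
  · exact ⟨fun h => absurd h (by decide), fun hd => absurd hd h1⟩
  · exact ⟨fun h => absurd h (by decide), fun hd => absurd hd h1⟩

theorem pvCls_eq_tilda (c : Char) : pvCls c = '~' ↔ c = '~' := by
  unfold pvCls
  split_ifs with h1 h2 h3
  · refine ⟨fun h => absurd h (by decide), fun h => ?_⟩
    subst h; exact absurd h1 (by decide)
  · refine ⟨fun h => absurd h (by decide), fun h => ?_⟩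
    subst h; exact absurd h2 (by decide)
  · exact ⟨fun _ => h3, fun _ => rfl⟩
  · exact ⟨fun h => absurd h (by decide), fun h => absurd h h3⟩

theorem pvCls_eq_bang (c : Char) : pvCls c = '!' ↔ (c = '!' ∨ c = '#') := by
  unfold pvCls
  split_ifs with h1 h2 h3
  · refine ⟨fun h => absurd h (by decide), fun h => ?_⟩
    rcases h with rfl | rfl <;> exact absurd h1 (by decide)
  · refine ⟨fun _ => ?_, fun _ => rfl⟩
    have := h2; simp only [Bool.or_eq_true, decide_eq_true_eq] at this; exact this
  · refine ⟨fun h => absurd h (by decide), fun h => ?_⟩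
    rcases h with rfl | rfl <;> exact (h2 (by decide)).elim
  · refine ⟨fun h => absurd h (by decide), fun h => ?_⟩
    rcases h with rfl | rfl <;> exact (h2 (by decide)).elim

-- B agrees with the loop invariant at index 0
theorem alt_iff (cs : List Char) :
    ((!(PySem.Chars.isIn ['d', '~'] (cs.map pvCls))) && !(PySem.Chars.isIn ['!', 'd'] (cs.map pvCls))) = true
      ↔ pvOkFrom cs 0 := by
  have hget : ∀ (j : Nat), j < cs.length →
      (cs.map pvCls).getD j ' ' = pvCls (cs.getD j ' ') := by
    intro j hj
    rw [List.getD_eq_getElem _ _ (by simpa using hj), List.getD_eq_getElem _ _ hj,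
        List.getElem_map]
  rw [Bool.and_eq_true, Bool.not_eq_true', Bool.not_eq_true']
  constructor
  · rintro ⟨h1, h2⟩
    constructor
    · rintro j hj _ ⟨ht, hd⟩
      have : PySem.Chars.isIn ['d', '~'] (cs.map pvCls) = true := by
        rw [pair_infix_iff]
        exact ⟨j, by simpa using hj,
          by rw [hget j (by omega), pvCls_eq_d]; exact hd,
          by rw [hget (j+1) hj, pvCls_eq_tilda]; exact ht⟩
      simp [this] at h1
    · rintro j hj _ ⟨hc, hd⟩
      have : PySem.Chars.isIn ['!', 'd'] (cs.map pvCls) = true := by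
        rw [pair_infix_iff]
        exact ⟨j, by simpa using hj,
          by rw [hget j (by omega), pvCls_eq_bang]; exact hc,
          by rw [hget (j+1) hj, pvCls_eq_d]; exact hd⟩
      simp [this] at h2
  · rintro ⟨t, s⟩
    constructor
    · cases h1 : PySem.Chars.isIn ['d', '~'] (cs.map pvCls)
      · rfl
      · exfalso
        rcases (pair_infix_iff _ _ _).mp h1 with ⟨j, hj, ha, hb⟩
        have hj' : j + 1 < cs.length := by simpa using hj
        rw [hget j (by omega), pvCls_eq_d] at ha
        rw [hget (j+1) hj', pvCls_eq_tilda] at hb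
        exact t j hj' (by omega) ⟨hb, ha⟩
    · cases h2 : PySem.Chars.isIn ['!', 'd'] (cs.map pvCls)
      · rfl
      · exfalso
        rcases (pair_infix_iff _ _ _).mp h2 with ⟨j, hj, ha, hb⟩
        have hj' : j + 1 < cs.length := by simpa using hj
        rw [hget j (by omega), pvCls_eq_bang] at ha
        rw [hget (j+1) hj', pvCls_eq_d] at hb
        exact s j hj' (by omega) ⟨ha, hb⟩

-- ===== VERDICT (by name: the statement is the Claim_ definition above) =====
theorem check_fact_tilda_sum_spec : Claim_equal_check_fact_tilda_sum := by
  intro str _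
  unfold Spec_check_fact_tilda_sum check_fact_tilda_sum check_fact_tilda_sum_alt
  have hA := pvAGo_eq_true_iff str.toList 0
  have hB := alt_iff str.toList
  by_cases h : pvOkFrom str.toList 0
  · rw [hA.mpr h]; exact (hB.mpr h).symm
  · have h1 : pvAGo str.toList 0 = false := by
      cases hh : pvAGo str.toList 0
      · rfl
      · exact absurd (hA.mp hh) h
    have h2 : ((!(PySem.Chars.isIn ['d', '~'] (str.toList.map pvCls))) &&
               !(PySem.Chars.isIn ['!', 'd'] (str.toList.map pvCls))) = false := by
      cases hh : ((!(PySem.Chars.isIn ['d', '~'] (str.toList.map pvCls))) &&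
                  !(PySem.Chars.isIn ['!', 'd'] (str.toList.map pvCls)))
      · rfl
      · exact absurd (hB.mp hh) h
    simp only [h1, h2]
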